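-- pv_equiv track=rewrite | github.com/nikusha55/GOA-41 | level88/homework/task.py | sep_str
-- ===== SOURCE A (Python) =====
-- def sep_str(st):
--     if not st:
--         return []
--
--     z = st.split()
--
--     x = 0
--     for y in z:
--         if len(y) > x:
--             x = len(y)
--
--     a = []
--     for b in range(x):
--         c = []
--         for d in range(len(z)):
--             c.append('')
--         a.append(c)
--
--     for e in range(len(z)):
--         for f in range(len(z[e])):
--             a[f][e] = z[e][f]
--
--     return a
-- ===== SOURCE B (Python) =====
-- def sep_str(st):
--     if not st:
--         return []
--
--     def rec(ws):
--         # matrix for ws: recursively build the matrix for ws[1:] and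
--         # prepend ws[0] as a new left column, padding shorter words with empty strings
--         if not ws:
--             return []
--         w = ws[0]
--         m = rec(ws[1:])
--         rows = max(len(w), len(m))
--         return [([w[f]] if f < len(w) else ['']) +
--                 (m[f] if f < len(m) else [''] * (len(ws) - 1))
--                 for f in range(rows)]
--
--     return rec(st.split())
-- ===== Notes on version B (the rewrite author's own statement) =====
-- stated objective: alternative
-- what changed: Replaces A's three staged passes (max-length scan, grid pre-allocation, index-by-index scatter) with a single structural recursion over the word list that builds the matrix for the tail and prepends the head word as a new left column, padding shorter words with empty strings as needed.
import Mathlib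
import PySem

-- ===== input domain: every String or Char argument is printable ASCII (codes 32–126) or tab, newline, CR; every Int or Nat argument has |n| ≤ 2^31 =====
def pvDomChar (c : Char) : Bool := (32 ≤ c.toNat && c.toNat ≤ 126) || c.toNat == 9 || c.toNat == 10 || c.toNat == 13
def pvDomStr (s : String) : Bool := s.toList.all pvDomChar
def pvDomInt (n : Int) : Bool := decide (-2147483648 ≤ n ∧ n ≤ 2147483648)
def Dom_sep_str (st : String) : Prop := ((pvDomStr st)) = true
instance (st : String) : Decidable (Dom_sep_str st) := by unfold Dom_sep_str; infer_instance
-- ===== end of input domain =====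

-- B replaces A's three staged passes (max-length scan, grid pre-allocation, index scatter) with
-- one structural recursion over the word list, prepending each word as a padded left column
-- (alternative decomposition, no speed claim); return values proved equal for all inputs.

-- ===== PORT A =====
def sep_str (st : String) : List (List String) :=
  if st = "" then []
  else
    let z := PySem.Str.split₀ st
    let x := z.foldl (fun x y => if PySem.Str.len y > x then PySem.Str.len y else x) 0
    let a := (PySem.List.pyRange 0 x 1).foldl (fun a _b =>
      a ++ [(PySem.List.pyRange 0 (PySem.List.len z) 1).foldl (fun c _d => c ++ [""]) []]) []
    let a := (PySem.List.pyRange 0 (PySem.List.len z) 1).foldl (fun a e =>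
      (PySem.List.pyRange 0 (PySem.Str.len (PySem.List.pyGetD z e "")) 1).foldl (fun a f =>
        PySem.List.pySetD a f
          (PySem.List.pySetD (PySem.List.pyGetD a f []) e
            -- z[e][f]: the 1-character string; total form of the in-range index
            (String.ofList [PySem.List.pyGetD (PySem.List.pyGetD z e "").toList f ' ']))) a) a
    a

-- ===== PORT B =====
-- rec(ws): matrix for ws[1:] built recursively, then ws[0] prepended as a padded left column
def pvRec (ws : List (List Char)) : List (List String) :=
  match ws with
  | [] => []
  | w :: rest =>
    let m := pvRec rest
    (List.range (max w.length m.length)).map (fun f =>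
      (match w[f]? with | some c => [String.ofList [c]] | none => [""]) ++
      (match m[f]? with | some row => row | none => List.replicate rest.length ""))

def sep_str_alt (st : String) : List (List String) :=
  if st = "" then []
  else pvRec ((PySem.Str.split₀ st).map String.toList)

-- ===== PRECONDITION & SPEC =====
def Spec_sep_str (st : String) (out : List (List String)) : Prop := out = sep_str_alt st
instance (st : String) (out : List (List String)) : Decidable (Spec_sep_str st out) := by unfold Spec_sep_str; infer_instance

-- ===== CLAIM (what is proved, stated in full; the proofs are below) =====
def Claim_equal_sep_str : Prop := ∀ (st : String), Dom_sep_str st → Spec_sep_str st (sep_str st)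

-- ===== LEMMAS AND PROOFS =====

-- the character of w at position f as Python's matrix entry: 1-char string, '' beyond the end
def pvEntry (f : Nat) (w : List Char) : String :=
  match w[f]? with
  | some c => String.ofList [c]
  | none => ""

-- maximum word length (foldr form, convenient for induction)
def pvMax (ws : List (List Char)) : Nat := ws.foldr (fun w r => max w.length r) 0

theorem pvMax_cons (w : List Char) (ws : List (List Char)) :
    pvMax (w :: ws) = max w.length (pvMax ws) := rfl

-- A's max-length foldl computes pvMax (as an Int)
theorem pvMaxFold_eq (z : List String) : ∀ (m : Nat),
    z.foldl (fun x y => if PySem.Str.len y > x then PySem.Str.len y else x) (m : Int)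
      = ((max m (pvMax (z.map String.toList)) : Nat) : Int) := by
  induction z with
  | nil => intro m; simp [pvMax]
  | cons y z ih =>
    intro m
    have hstep : (if PySem.Str.len y > (m:Int) then PySem.Str.len y else (m:Int))
        = ((max m y.toList.length : Nat) : Int) := by
      simp only [PySem.Str.len_eq]
      split_ifs with h <;> push_cast <;> omega
    simp only [List.foldl_cons, hstep, ih, List.map_cons, pvMax_cons]
    push_cast; omega

theorem pvMax_le_of_mem (ws : List (List Char)) (w : List Char) (hw : w ∈ ws) :
    w.length ≤ pvMax ws := by
  induction ws with
  | nil => simp at hw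
  | cons v vs ih =>
    rcases List.mem_cons.1 hw with rfl | hw
    · simp [pvMax_cons]
    · have := ih hw; simp [pvMax_cons]; omega

-- B's column-prepending recursion equals the column-by-column specification
theorem pvRec_eq (ws : List (List Char)) :
    pvRec ws = (List.range (pvMax ws)).map (fun f => ws.map (pvEntry f)) := by
  induction ws with
  | nil => rfl
  | cons w rest ih =>
    simp only [pvRec, ih]
    have hlen : ((List.range (pvMax rest)).map (fun f => rest.map (pvEntry f))).length
        = pvMax rest := by simp
    rw [hlen, pvMax_cons]
    apply List.map_congr_left
    intro f _
    rw [List.map_cons, show pvEntry f w :: rest.map (pvEntry f)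
        = [pvEntry f w] ++ rest.map (pvEntry f) from rfl]
    congr 1
    · cases h : w[f]? <;> simp [pvEntry, h]
    · by_cases hf : f < pvMax rest
      · rw [List.getElem?_map, List.getElem?_range hf]
        rfl
      · rw [List.getElem?_eq_none (by simpa using not_lt.1 hf)]
        have : rest.map (pvEntry f) = List.replicate rest.length "" := by
          rw [List.eq_replicate_iff]
          refine ⟨by simp, ?_⟩
          intro s hs
          rcases List.mem_map.1 hs with ⟨v, hv, rfl⟩
          have hvf : v.length ≤ f := le_trans (pvMax_le_of_mem rest v hv) (not_lt.1 hf)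
          simp [pvEntry, List.getElem?_eq_none hvf]
        simp [this]

-- set on a range-map rewrites pointwise
theorem pvSet_map_range {α : Type} (g : Nat → α) (x m : Nat) (v : α) (hm : m < x) :
    ((List.range x).map g).set m v = (List.range x).map (fun f => if f = m then v else g f) := by
  apply List.ext_getElem
  · simp
  · intro i h1 h2
    rw [List.getElem_set]
    simp only [List.getElem_map, List.getElem_range]
    have hi : i < x := by simpa using h2
    by_cases hem : m = i
    · subst hem; simp
    · rw [if_neg hem, if_neg (fun hh => hem hh.symm)]

-- A's inner scatter loop, characterised row by row
theorem pvInner_eq (g : Nat → List String) (x : Nat) (e : Int) (w : List Char) :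
    ∀ (m : Nat), m ≤ x →
    (PySem.List.pyRange 0 (m : Int) 1).foldl
      (fun a f => PySem.List.pySetD a f
        (PySem.List.pySetD (PySem.List.pyGetD a f []) e
          (String.ofList [PySem.List.pyGetD w f ' '])))
      ((List.range x).map g)
    = (List.range x).map (fun f =>
        if f < m then PySem.List.pySetD (g f) e (String.ofList [PySem.List.pyGetD w (f : Int) ' '])
        else g f) := by
  intro m
  induction m with
  | zero =>
    intro _
    rw [PySem.List.pyRange_one_eq_nil (by omega)]
    simp
  | succ m ih =>
    intro hm
    rw [show ((m + 1 : Nat) : Int) = (m : Int) + 1 by push_cast; ring,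
        PySem.List.pyRange_one_succ_right (by omega), List.foldl_append, ih (by omega)]
    simp only [List.foldl_cons, List.foldl_nil]
    have hmx : m < x := by omega
    have hg : PySem.List.pyGetD ((List.range x).map (fun f =>
        if f < m then PySem.List.pySetD (g f) e (String.ofList [PySem.List.pyGetD w (f : Int) ' '])
        else g f)) (m : Int) [] = g m := by
      rw [PySem.List.pyGetD_natCast, List.getD_eq_getElem?_getD, List.getElem?_map,
          List.getElem?_range hmx]
      simp
    rw [hg, PySem.List.pySetD_natCast, pvSet_map_range _ _ _ _ hmx]
    apply List.map_congr_left
    intro f hf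
    by_cases h1 : f = m
    · subst h1
      rw [if_pos rfl, if_pos (by omega)]
    · rw [if_neg h1]
      by_cases h2 : f < m
      · rw [if_pos h2, if_pos (by omega)]
      · rw [if_neg h2, if_neg (by omega)]

-- setting the first padding cell right after the filled prefix
theorem pvSet_mid (A : List String) (c : Nat) (v : String) (hc : c ≠ 0) :
    (A ++ List.replicate c "").set A.length v = A ++ v :: List.replicate (c - 1) "" := by
  obtain ⟨c', rfl⟩ : ∃ c', c = c' + 1 := ⟨c - 1, by omega⟩
  rw [List.replicate_succ]
  apply List.ext_getElem
  · simp
  · intro i h1 h2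
    rw [List.getElem_set]
    by_cases hi : i = A.length
    · simp [hi]
    · rw [if_neg (fun hh => hi hh.symm)]
      by_cases hlt : i < A.length
      · rw [List.getElem_append_left hlt, List.getElem_append_left hlt]
      · have hgt : A.length < i := by omega
        rw [List.getElem_append_right (by omega), List.getElem_append_right (by omega)]
        simp only [List.getElem_cons]
        rw [dif_neg (by omega), dif_neg (by omega)]
        simp

-- A's outer scatter loop: after k words, the first k columns are filled
theorem pvOuter_eq (z : List String) : ∀ (k : Nat), k ≤ z.length →
    (PySem.List.pyRange 0 (k : Int) 1).foldl
      (fun a e => (PySem.List.pyRange 0 (PySem.Str.len (PySem.List.pyGetD z e "")) 1).foldl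
        (fun a f => PySem.List.pySetD a f
          (PySem.List.pySetD (PySem.List.pyGetD a f []) e
            (String.ofList [PySem.List.pyGetD (PySem.List.pyGetD z e "").toList f ' ']))) a)
      ((List.range (pvMax (z.map String.toList))).map (fun _ => List.replicate z.length ""))
    = (List.range (pvMax (z.map String.toList))).map (fun f =>
        (z.take k).map (fun y => pvEntry f y.toList) ++ List.replicate (z.length - k) "") := by
  intro k
  induction k with
  | zero =>
    intro _
    rw [PySem.List.pyRange_one_eq_nil (by omega)]
    simp
  | succ k ih =>
    intro hk
    have hkn : k < z.length := by omega
    rw [show ((k + 1 : Nat) : Int) = (k : Int) + 1 by push_cast; ring,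
        PySem.List.pyRange_one_succ_right (by omega), List.foldl_append, ih (by omega)]
    simp only [List.foldl_cons, List.foldl_nil]
    have hz : PySem.List.pyGetD z (k : Int) "" = z[k] := by
      rw [PySem.List.pyGetD_natCast, List.getD_eq_getElem?_getD, List.getElem?_eq_getElem hkn]
      rfl
    rw [hz]
    have hlen : PySem.Str.len z[k] = ((z[k].toList.length : Nat) : Int) := by
      simp [PySem.Str.len_eq]
    rw [hlen]
    have hmX : z[k].toList.length ≤ pvMax (z.map String.toList) :=
      pvMax_le_of_mem _ _ (List.mem_map_of_mem (List.getElem_mem hkn))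
    rw [pvInner_eq _ _ _ _ _ hmX]
    apply List.map_congr_left
    intro f hf
    have hA : ((z.take k).map (fun y => pvEntry f y.toList)).length = k := by
      simp [List.length_take, hkn.le]
    have htake : z.take (k + 1) = z.take k ++ [z[k]] := by
      rw [List.take_add_one, List.getElem?_eq_getElem hkn]
      rfl
    by_cases hfm : f < z[k].toList.length
    · rw [if_pos hfm, PySem.List.pySetD_natCast]
      have hch : PySem.List.pyGetD z[k].toList (f : Int) ' ' = z[k].toList[f] := by
        rw [PySem.List.pyGetD_natCast, List.getD_eq_getElem?_getD, List.getElem?_eq_getElem hfm]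
        rfl
      rw [hch]
      have hmid := pvSet_mid ((z.take k).map (fun y => pvEntry f y.toList)) (z.length - k)
        (String.ofList [z[k].toList[f]]) (by omega)
      rw [hA] at hmid
      rw [hmid, htake, List.map_append]
      have hent : pvEntry f z[k].toList = String.ofList [z[k].toList[f]] := by
        simp [pvEntry, List.getElem?_eq_getElem hfm]
      have hc : z.length - k - 1 = z.length - (k + 1) := by omega
      simp [hent, hc]
    · rw [if_neg hfm]
      have hnone : z[k].toList[f]? = none := List.getElem?_eq_none (by omega)
      have hc : z.length - k = (z.length - (k + 1)) + 1 := by omega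
      rw [htake, List.map_append, hc, List.replicate_succ]
      simp [pvEntry, hnone]

-- ===== VERDICT (by name: the statement is the Claim_ definition above) =====
theorem sep_str_spec : Claim_equal_sep_str := by
  unfold Claim_equal_sep_str Spec_sep_str
  intro st _
  by_cases hst : st = ""
  · simp [sep_str, sep_str_alt, hst]
  · simp only [sep_str, sep_str_alt, if_neg hst]
    have hx := pvMaxFold_eq (PySem.Str.split₀ st) 0
    simp only [Nat.cast_zero, Nat.zero_max] at hx
    rw [hx]
    have hrow : (PySem.List.pyRange 0 (PySem.List.len (PySem.Str.split₀ st)) 1).foldl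
        (fun c _ => c ++ [""]) [] = List.replicate (PySem.Str.split₀ st).length "" := by
      rw [PySem.List.foldl_append_singleton_eq_map]
      simp [List.map_const', PySem.List.length_pyRange_one]
    rw [hrow]
    have hmat : (PySem.List.pyRange 0 ((pvMax ((PySem.Str.split₀ st).map String.toList) : Nat) : Int) 1).foldl
        (fun a _ => a ++ [List.replicate (PySem.Str.split₀ st).length ""]) []
        = (List.range (pvMax ((PySem.Str.split₀ st).map String.toList))).map
            (fun _ => List.replicate (PySem.Str.split₀ st).length "") := by
      rw [PySem.List.foldl_append_singleton_eq_map]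
      simp [List.map_const', PySem.List.length_pyRange_one]
    rw [hmat]
    have houter := pvOuter_eq (PySem.Str.split₀ st) (PySem.Str.split₀ st).length (le_refl _)
    rw [PySem.List.len_eq, houter, pvRec_eq]
    have hfin : ∀ f : Nat, ((PySem.Str.split₀ st).map String.toList).map (pvEntry f)
        = (PySem.Str.split₀ st).map (fun y => pvEntry f y.toList) := by
      intro f
      rw [List.map_map]
      rfl
    simp only [List.take_length, Nat.sub_self, List.replicate_zero, List.append_nil, hfin]
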